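-- pv_equiv track=rewrite | github.com/rdelarosa3/python-playground | functions.py | old_macdonald
-- ===== SOURCE A (Python) =====
-- def old_macdonald(name):
-- 	new_name = ''
-- 	for index, value in enumerate(name):
-- 		if index == 0 or index == 3:
-- 			new_name += value.upper()
-- 		else:
-- 			new_name += value
-- 	return new_name
-- ===== SOURCE B (Python) =====
-- def old_macdonald(name):
--     return name[:1].upper() + name[1:3] + name[3:4].upper() + name[4:]
-- ===== Notes on version B (the rewrite author's own statement) =====
-- stated objective: idiomatic
-- what changed: Replaces A's per-character enumerate loop with repeated string concatenation by one slice decomposition name[:1].upper() + name[1:3] + name[3:4].upper() + name[4:].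
import Mathlib
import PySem

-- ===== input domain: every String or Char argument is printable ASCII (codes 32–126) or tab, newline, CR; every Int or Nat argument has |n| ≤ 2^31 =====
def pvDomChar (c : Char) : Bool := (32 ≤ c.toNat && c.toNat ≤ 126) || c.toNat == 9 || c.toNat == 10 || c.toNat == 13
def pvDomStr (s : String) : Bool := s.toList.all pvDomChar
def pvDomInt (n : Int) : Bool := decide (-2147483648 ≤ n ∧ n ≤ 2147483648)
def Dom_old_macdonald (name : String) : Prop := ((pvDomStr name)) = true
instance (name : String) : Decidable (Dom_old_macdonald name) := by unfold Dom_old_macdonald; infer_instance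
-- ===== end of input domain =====

-- B replaces A's character-by-character enumerate loop with one slice decomposition (idiomatic).

-- ===== PORT A =====
-- A: accumulate new_name over enumerate(name), uppercasing at index 0 and 3.
def old_macdonald (name : String) : String :=
  String.ofList ((PySem.List.enumerate name.toList 0).foldl
    (fun acc p => acc ++ [if p.1 == 0 || p.1 == 3 then PySem.Chars.upperChar p.2 else p.2]) [])

-- ===== PORT B =====
-- B: name[:1].upper() + name[1:3] + name[3:4].upper() + name[4:]
def old_macdonald_alt (name : String) : String :=
  String.ofList (PySem.Chars.upper (PySem.List.slice name.toList none (some 1))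
    ++ PySem.List.slice name.toList (some 1) (some 3)
    ++ PySem.Chars.upper (PySem.List.slice name.toList (some 3) (some 4))
    ++ PySem.List.slice name.toList (some 4) none)

-- ===== PRECONDITION & SPEC =====
def Spec_old_macdonald (name : String) (out : String) : Prop := out = old_macdonald_alt name
instance (name : String) (out : String) : Decidable (Spec_old_macdonald name out) := by unfold Spec_old_macdonald; infer_instance

-- ===== CLAIM (what is proved, stated in full; the proofs are below) =====
def Claim_equal_old_macdonald : Prop := ∀ (name : String), Dom_old_macdonald name → Spec_old_macdonald name (old_macdonald name)

-- ===== LEMMAS AND PROOFS =====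
-- From index 4 on, A's loop just copies the characters.
theorem pv_map_hi (l : List Char) (s : Int) (hs : 4 ≤ s) :
    (List.map (fun p => [if p.1 = 0 ∨ p.1 = 3 then PySem.Chars.upperChar p.2 else p.2])
      (PySem.List.enumerate l s)).flatten = l := by
  induction l generalizing s with
  | nil => simp [PySem.List.enumerate_nil]
  | cons a t ih =>
    rw [PySem.List.enumerate_cons]
    simp only [List.map_cons, List.flatten_cons,
      if_neg (by omega : ¬((s : Int) = 0 ∨ s = 3))]
    simp [ih (s + 1) (by omega)]

-- ===== VERDICT (by name: the statement is the Claim_ definition above) =====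
theorem old_macdonald_spec : Claim_equal_old_macdonald := by
  intro name _
  unfold Spec_old_macdonald old_macdonald old_macdonald_alt
  have hsl13 : PySem.List.slice name.toList (some 1) (some 3)
      = (name.toList.drop 1).take 2 := by
    simpa using PySem.List.slice_natCast name.toList 1 3
  have hsl34 : PySem.List.slice name.toList (some 3) (some 4)
      = (name.toList.drop 3).take 1 := by
    simpa using PySem.List.slice_natCast name.toList 3 4
  have hsl1 : PySem.List.slice name.toList none (some 1) = name.toList.take 1 := by
    simpa using PySem.List.slice_to_natCast name.toList 1
  have hsl4 : PySem.List.slice name.toList (some 4) none = name.toList.drop 4 := by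
    simpa using PySem.List.slice_from_natCast name.toList 4
  rw [hsl13, hsl34, hsl1, hsl4]
  generalize name.toList = cs
  match cs with
  | [] => simp [PySem.List.enumerate_nil, PySem.Chars.upper]
  | [a] =>
      simp [PySem.List.enumerate_cons, PySem.List.enumerate_nil, PySem.Chars.upper]
  | [a, b] =>
      simp [PySem.List.enumerate_cons, PySem.List.enumerate_nil, PySem.Chars.upper]
  | [a, b, c] =>
      simp [PySem.List.enumerate_cons, PySem.List.enumerate_nil, PySem.Chars.upper]
  | a :: b :: c :: d :: rest =>
      simp [PySem.Chars.upper]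
      rw [pv_map_hi rest 4 (by omega)]
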